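-- pv_equiv track=rewrite | github.com/Hyojeong721/TIL | make_sub_reop_file/SWA/0810/haeri.lim.lhr/4831_전기버스/s1.py | bus
-- ===== SOURCE A (Python) =====
-- def bus(K,N,station):
--
--     # stop: 현재 위치
--     # result: 충전횟수
--     stop, result = 0, 0
--
--     # 현재위치가 N 전이면 반복
--     while stop <= N:
--
--         # 현재위치에서 최대 이동거리가 N 보다 크면 반복문 탈출
--         if stop + K >= N:
--             return result
--         # 현재위치에서 최대이동거리를 더한 값이 station안에 있는 값이라면
--         # 위치이동하고 충전횟수 추가
--         elif stop + K in station: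
--             stop += K
--             result += 1
--
--         # 현재위치에서 최대이동거리를 더한 값이 station안에 있는 값이 아니라면
--         # 1~k 값을 역순으로 더 해서 최대값과 현재 위치 사이에 station이 있는지 확인
--         elif stop + K not in station:
--             for k in range(K-1,0,-1):
--                 if stop + k in station:
--                     stop += k
--                     result += 1
--                     break
--             # 없을 경우 0 리턴
--             else:
--                 return 0
-- ===== SOURCE B (Python) =====
-- def bus(K, N, station):
--     # Sort once, then sweep a single pointer over the sorted stations:
--     # each step jump to the furthest station in (stop, stop+K].
--     st = sorted(station)
--     n = len(st)
--     stop, result, i = 0, 0, 0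
--     while stop + K < N:
--         best = None
--         while i < n and st[i] <= stop + K:
--             if st[i] > stop:
--                 best = st[i]
--             i += 1
--         if best is None:
--             return 0
--         stop, result = best, result + 1
--     return result
-- ===== Notes on version B (the rewrite author's own statement) =====
-- stated objective: faster
-- what changed: A repeatedly tests 'stop+k in station' by linear list membership for every offset k=K..1 at every stop; B sorts the stations once and sweeps a single monotone pointer over the sorted list, jumping each step to the furthest station in (stop, stop+K].
-- outside the precondition, e.g. on bus(3, -1, [1]): A returns None, B returns 0
import Mathlib
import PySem

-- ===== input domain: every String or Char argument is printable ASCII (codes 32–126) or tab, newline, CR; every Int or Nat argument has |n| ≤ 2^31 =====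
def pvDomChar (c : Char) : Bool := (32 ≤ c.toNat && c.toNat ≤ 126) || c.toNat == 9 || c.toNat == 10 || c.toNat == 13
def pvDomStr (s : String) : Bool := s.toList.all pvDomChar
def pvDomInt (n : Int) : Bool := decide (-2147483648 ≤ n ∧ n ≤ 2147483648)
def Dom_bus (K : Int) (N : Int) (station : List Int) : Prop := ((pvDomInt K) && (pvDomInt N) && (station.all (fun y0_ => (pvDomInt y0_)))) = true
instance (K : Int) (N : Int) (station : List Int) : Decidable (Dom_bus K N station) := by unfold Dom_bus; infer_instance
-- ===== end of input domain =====

-- B replaces A's repeated list-membership scans over the offsets K..1 at every stop by one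
-- sort of the stations and a single monotone pointer sweep over the sorted list (objective: faster).

-- ===== PORT A =====
-- A's inner 'for k in range(K-1,0,-1): if stop+k in station: ... break / else: return 0':
-- first k in the given list with stop+k in station.
def busScan (stop : Int) (station : List Int) : List Int → Option Int
  | [] => none
  | k :: ks => if station.contains (stop + k) then some k else busScan stop station ks

-- A's 'while stop <= N' loop. The fuel is only a totality guard: inside Pre_bus every
-- round either returns or moves stop to a fresh station value, so station.length + 2
-- rounds always suffice. The final 'else 0' mirrors Python falling off the while loop
-- (A returns None there); Pre_bus excludes those inputs.
def busLoop (K N : Int) (station : List Int) : Nat → Int → Int → Int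
  | 0, _, _ => 0
  | fuel+1, stop, result =>
    if stop ≤ N then
      if stop + K ≥ N then result
      else if station.contains (stop + K) then busLoop K N station fuel (stop + K) (result + 1)
      else
        match busScan stop station (PySem.List.pyRange (K - 1) 0 (-1)) with
        | some k => busLoop K N station fuel (stop + k) (result + 1)
        | none => 0
    else 0

def bus (K : Int) (N : Int) (station : List Int) : Int :=
  busLoop K N station (station.length + 2) 0 0

-- ===== PORT B =====
-- B's inner 'while i < n and st[i] <= stop + K' pointer sweep: consume the prefix of the
-- remaining sorted list that is ≤ stop+K, remembering the last consumed element > stop.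
def bestTake (K stop : Int) : Option Int → List Int → Option Int × List Int
  | best, [] => (best, [])
  | best, x :: xs =>
    if x ≤ stop + K then bestTake K stop (if stop < x then some x else best) xs
    else (best, x :: xs)

-- termination helpers for busAltLoop (cited in decreasing_by)
theorem bestTake_len_le (K stop : Int) : ∀ (l : List Int) (b0 : Option Int),
    ((bestTake K stop b0 l).2).length ≤ l.length := by
  intro l
  induction l with
  | nil => intro b0; simp [bestTake]
  | cons x xs ih =>
    intro b0
    by_cases h : x ≤ stop + K
    · simp only [bestTake, if_pos h]
      exact le_trans (ih _) (by simp)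
    · simp [bestTake, if_neg h]

theorem bestTake_some_len (K stop : Int) (l : List Int) (b : Int) (r : List Int)
    (h : bestTake K stop none l = (some b, r)) : r.length < l.length := by
  cases l with
  | nil => simp [bestTake] at h
  | cons x xs =>
    by_cases hx : x ≤ stop + K
    · simp only [bestTake, if_pos hx] at h
      have h2 := bestTake_len_le K stop xs (if stop < x then some x else none)
      rw [h] at h2
      simpa using Nat.lt_succ_of_le h2
    · simp [bestTake, if_neg hx] at h

-- B's outer 'while stop + K < N' loop over the remaining sorted stations.
def busAltLoop (K N : Int) (rest : List Int) (stop result : Int) : Int :=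
  if stop + K < N then
    match h : bestTake K stop none rest with
    | (some b, rest') => busAltLoop K N rest' b (result + 1)
    | (none, _) => 0
  else result
termination_by rest.length
decreasing_by exact bestTake_some_len K stop rest b rest' h

def bus_alt (K : Int) (N : Int) (station : List Int) : Int :=
  busAltLoop K N (PySem.List.sorted station (fun x => x) false) 0 0

-- ===== PRECONDITION & SPEC =====
-- Pre_bus excludes exactly (a) N < 0, where A's while loop never runs and A returns None
-- (not an int), and (b) K = 0 with 0 < N and a station at 0, where A loops forever
-- (stop += 0 repeats). On every other input A returns normally.
def Pre_bus (K : Int) (N : Int) (station : List Int) : Prop :=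
  0 ≤ N ∧ ¬(K = 0 ∧ 0 < N ∧ (0 : Int) ∈ station)
instance (K : Int) (N : Int) (station : List Int) : Decidable (Pre_bus K N station) := by
  unfold Pre_bus; infer_instance

def pvWitness_bus : Int × Int × List Int := (2, 10, [2, 4, 6, 8])

def Spec_bus (K : Int) (N : Int) (station : List Int) (out : Int) : Prop := out = bus_alt K N station
instance (K : Int) (N : Int) (station : List Int) (out : Int) : Decidable (Spec_bus K N station out) := by unfold Spec_bus; infer_instance

-- ===== CLAIM (what is proved, stated in full; the proofs are below) =====
def Claim_equal_bus : Prop := ∀ (K : Int) (N : Int) (station : List Int), Dom_bus K N station → Pre_bus K N station → Spec_bus K N station (bus K N station)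

-- ===== LEMMAS AND PROOFS =====

theorem contains_true_iff (l : List Int) (a : Int) : l.contains a = true ↔ a ∈ l := by simp

-- A-side: the descending scan finds nothing when no offset 1..a is a station.
theorem scan_desc_none (station : List Int) (stop : Int) :
    ∀ (n : Nat) (a : Int), a ≤ n →
      (∀ j : Int, 1 ≤ j → j ≤ a → station.contains (stop + j) = false) →
      busScan stop station (PySem.List.pyRange a 0 (-1)) = none := by
  intro n
  induction n with
  | zero =>
    intro a ha _
    rw [PySem.List.pyRange_neg_one_eq_nil (by exact_mod_cast ha)]
    rfl
  | succ n ih =>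
    intro a ha h
    by_cases h0 : a ≤ 0
    · rw [PySem.List.pyRange_neg_one_eq_nil h0]
      rfl
    · rw [PySem.List.pyRange_neg_one_cons (by omega)]
      simp only [busScan, h a (by omega) le_rfl, Bool.false_eq_true, if_false]
      exact ih (a - 1) (by push_cast at ha ⊢; omega) (fun j h1 h2 => h j h1 (by omega))

-- A-side: the descending scan finds the LARGEST offset k with stop+k in station.
theorem scan_desc_some (station : List Int) (stop : Int) :
    ∀ (n : Nat) (a k : Int), a ≤ n → 1 ≤ k → k ≤ a →
      station.contains (stop + k) = true →
      (∀ j : Int, k < j → j ≤ a → station.contains (stop + j) = false) →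
      busScan stop station (PySem.List.pyRange a 0 (-1)) = some k := by
  intro n
  induction n with
  | zero =>
    intro a k ha h1 h2 _ _
    exfalso
    have : a ≤ 0 := by exact_mod_cast ha
    omega
  | succ n ih =>
    intro a k ha h1 h2 hk h
    rw [PySem.List.pyRange_neg_one_cons (by omega : (0:Int) < a)]
    by_cases hka : k = a
    · subst hka
      have hk' : stop + k ∈ station := (contains_true_iff _ _).mp hk
      simp [busScan, hk']
    · have hfa : station.contains (stop + a) = false := h a (by omega) le_rfl
      simp only [busScan, hfa, Bool.false_eq_true, if_false]
      exact ih (a - 1) k (by push_cast at ha ⊢; omega) h1 (by omega) hk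
        (fun j hj1 hj2 => h j hj1 (by omega))

-- B-side: the untaken part is a suffix, and everything taken is ≤ stop+K.
theorem bestTake_append (K stop : Int) : ∀ (l : List Int) (b0 : Option Int),
    ∃ t, l = t ++ (bestTake K stop b0 l).2 ∧ ∀ x ∈ t, x ≤ stop + K := by
  intro l
  induction l with
  | nil => intro b0; exact ⟨[], by simp [bestTake], by simp⟩
  | cons x xs ih =>
    intro b0
    by_cases h : x ≤ stop + K
    · obtain ⟨t, ht1, ht2⟩ := ih (if stop < x then some x else b0)
      refine ⟨x :: t, ?_, ?_⟩
      · simp only [bestTake, if_pos h, List.cons_append]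
        exact congrArg (x :: ·) ht1
      · intro y hy
        rcases List.mem_cons.mp hy with hy | hy
        · exact hy ▸ h
        · exact ht2 y hy
    · exact ⟨[], by simp [bestTake, if_neg h], by simp⟩

-- B-side: a 'none' sweep result means the accumulator was none and the sorted list has
-- no candidate (stop < x ≤ stop+K).
theorem bestTake_none (K stop : Int) : ∀ (l : List Int) (b0 : Option Int),
    List.Pairwise (· ≤ ·) l → (bestTake K stop b0 l).1 = none →
    b0 = none ∧ ∀ x ∈ l, ¬(stop < x ∧ x ≤ stop + K) := by
  intro l
  induction l with
  | nil =>
    intro b0 _ hn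
    refine ⟨by simpa [bestTake] using hn, by simp⟩
  | cons x xs ih =>
    intro b0 hpw hn
    obtain ⟨hx, hpw'⟩ := List.pairwise_cons.mp hpw
    by_cases h : x ≤ stop + K
    · simp only [bestTake, if_pos h] at hn
      obtain ⟨hb0', hxs⟩ := ih _ hpw' hn
      have hnx : ¬ stop < x ∧ b0 = none := by
        by_cases hsx : stop < x
        · rw [if_pos hsx] at hb0'; exact absurd hb0' (by simp)
        · rw [if_neg hsx] at hb0'; exact ⟨hsx, hb0'⟩
      refine ⟨hnx.2, ?_⟩
      intro y hy
      rcases List.mem_cons.mp hy with hy | hy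
      · subst hy; exact fun hc => hnx.1 hc.1
      · exact hxs y hy
    · simp only [bestTake, if_neg h] at hn
      refine ⟨hn, ?_⟩
      intro y hy
      rcases List.mem_cons.mp hy with hy | hy
      · subst hy; exact fun hc => h hc.2
      · exact fun hc => h (le_trans (hx y hy) hc.2)

-- B-side: a 'some v' sweep result is the maximal candidate of the sorted list
-- (or the untouched accumulator).
theorem bestTake_some (K stop v : Int) : ∀ (l : List Int) (b0 : Option Int),
    List.Pairwise (· ≤ ·) l → (bestTake K stop b0 l).1 = some v →
    ((v ∈ l ∧ stop < v ∧ v ≤ stop + K) ∨ b0 = some v) ∧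
    (∀ x ∈ l, stop < x → x ≤ stop + K → x ≤ v) := by
  intro l
  induction l with
  | nil =>
    intro b0 _ hs
    exact ⟨Or.inr (by simpa [bestTake] using hs), by simp⟩
  | cons x xs ih =>
    intro b0 hpw hs
    obtain ⟨hx, hpw'⟩ := List.pairwise_cons.mp hpw
    by_cases h : x ≤ stop + K
    · simp only [bestTake, if_pos h] at hs
      obtain ⟨C1, C2⟩ := ih _ hpw' hs
      constructor
      · rcases C1 with ⟨hm, hc1, hc2⟩ | hb
        · exact Or.inl ⟨List.mem_cons_of_mem _ hm, hc1, hc2⟩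
        · by_cases hsx : stop < x
          · rw [if_pos hsx] at hb
            have hxv : x = v := by simpa using hb
            subst hxv
            exact Or.inl ⟨List.mem_cons_self, hsx, h⟩
          · rw [if_neg hsx] at hb; exact Or.inr hb
      · intro y hy hy1 hy2
        rcases List.mem_cons.mp hy with hy | hy
        · subst hy
          rcases C1 with ⟨hm, _, _⟩ | hb
          · exact hx v hm
          · rw [if_pos hy1] at hb
            have : y = v := by simpa using hb
            omega
        · exact C2 y hy hy1 hy2
    · simp only [bestTake, if_neg h] at hs
      refine ⟨Or.inr hs, ?_⟩
      intro y hy hy1 hy2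
      rcases List.mem_cons.mp hy with hy | hy
      · subst hy; exact absurd hy2 h
      · exact absurd (le_trans (hx y hy) hy2) h

-- the sweep cannot find a candidate when K ≤ 0
theorem bestTake_nonpos (K stop : Int) (hK : K ≤ 0) (l : List Int)
    (hpw : List.Pairwise (· ≤ ·) l) : (bestTake K stop none l).1 = none := by
  rcases h : (bestTake K stop none l).1 with _ | v
  · rfl
  · exfalso
    rcases (bestTake_some K stop v l none hpw h).1 with ⟨_, h1, h2⟩ | h'
    · omega
    · exact absurd h' (by simp)

-- K < 0: A's loop always ends in 'return 0'.
theorem busLoop_neg (K N : Int) (station : List Int) (hK : K ≤ -1) :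
    ∀ (fuel : Nat) (stop result : Int), stop ≤ N → busLoop K N station fuel stop result = 0 := by
  intro fuel
  induction fuel with
  | zero => intro stop result _; rfl
  | succ f ih =>
    intro stop result hsN
    simp only [busLoop, if_pos hsN]
    rw [if_neg (by omega : ¬ stop + K ≥ N)]
    split_ifs with hc
    · exact ih (stop + K) _ (by omega)
    · rw [PySem.List.pyRange_neg_one_eq_nil (by omega : K - 1 ≤ 0)]
      simp [busScan]

-- main lockstep lemma for K ≥ 1: A's loop and B's sweep move through the same stops
theorem lockstep (K N : Int) (station : List Int) (hK : 1 ≤ K) :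
    ∀ (fuel : Nat) (pre rest : List Int) (stop result : Int),
      pre ++ rest = PySem.List.sorted station (fun x => x) false →
      (∀ x ∈ pre, x ≤ stop) →
      stop ≤ N →
      rest.length < fuel →
      busLoop K N station fuel stop result = busAltLoop K N rest stop result := by
  intro fuel
  induction fuel with
  | zero => intro _ _ _ _ _ _ _ hlen; omega
  | succ f ih =>
    intro pre rest stop result hsplit hpre hsN hlen
    have hmem : ∀ x : Int, x ∈ station ↔ x ∈ pre ∨ x ∈ rest := by
      intro x
      rw [← List.mem_append, hsplit]
      simp [PySem.List.mem_sorted]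
    have hpw : List.Pairwise (· ≤ ·) (pre ++ rest) := by
      rw [hsplit]
      simpa using PySem.List.sorted_pairwise station (fun x => x)
    have hpwr : List.Pairwise (· ≤ ·) rest := (List.pairwise_append.mp hpw).2.1
    rw [busAltLoop]
    by_cases hc : stop + K < N
    · rw [if_pos hc]
      simp only [busLoop, if_pos hsN]
      rw [if_neg (by omega : ¬ stop + K ≥ N)]
      rcases hbt : bestTake K stop none rest with ⟨b, rest'⟩
      cases b with
      | none =>
        have hnone := (bestTake_none K stop rest none hpwr (by rw [hbt])).2
        have hnocand : ∀ x ∈ station, ¬(stop < x ∧ x ≤ stop + K) := by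
          intro x hxs hc'
          rcases (hmem x).mp hxs with hxp | hxr
          · exact absurd (hpre x hxp) (by omega)
          · exact hnone x hxr hc'
        have hcK : station.contains (stop + K) = false := by
          rw [Bool.eq_false_iff]
          intro hmemK
          exact hnocand (stop + K) ((contains_true_iff _ _).mp hmemK) ⟨by omega, le_rfl⟩
        rw [if_neg (by simpa using hcK)]
        rw [scan_desc_none station stop (K - 1).toNat (K - 1) (by omega)
          (fun j hj1 hj2 => by
            rw [Bool.eq_false_iff]
            intro hmemJ
            exact hnocand (stop + j) ((contains_true_iff _ _).mp hmemJ) ⟨by omega, by omega⟩)]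
      | some v =>
        have hb := bestTake_some K stop v rest none hpwr (by rw [hbt])
        have hvcand : v ∈ rest ∧ stop < v ∧ v ≤ stop + K := by
          rcases hb.1 with h' | h'
          · exact h'
          · exact absurd h' (by simp)
        have hvmax : ∀ x ∈ station, stop < x → x ≤ stop + K → x ≤ v := by
          intro x hxs h1 h2
          rcases (hmem x).mp hxs with hxp | hxr
          · exact absurd (hpre x hxp) (by omega)
          · exact hb.2 x hxr h1 h2
        have hvmem : v ∈ station := (hmem v).mpr (Or.inr hvcand.1)
        obtain ⟨t, ht1, ht2⟩ := bestTake_append K stop rest none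
        have ht1' : rest = t ++ rest' := by
          rw [hbt] at ht1
          exact ht1
        have hrec : busLoop K N station f v (result + 1) = busAltLoop K N rest' v (result + 1) := by
          apply ih (pre ++ t) rest' v (result + 1)
          · rw [List.append_assoc, ← ht1', hsplit]
          · intro x hx
            rcases List.mem_append.mp hx with hxp | hxt
            · have := hpre x hxp; omega
            · by_cases hsx : stop < x
              · exact hb.2 x (ht1' ▸ List.mem_append.mpr (Or.inl hxt)) hsx (ht2 x hxt)
              · omega
          · omega
          · have := bestTake_some_len K stop rest v rest' hbt
            omega
        by_cases hvK : v = stop + K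
        · have hcK : station.contains (stop + K) = true :=
            (contains_true_iff _ _).mpr (hvK ▸ hvmem)
          rw [if_pos hcK, ← hvK]
          exact hrec
        · have hcK : station.contains (stop + K) = false := by
            rw [Bool.eq_false_iff]
            intro hmemK
            have := hvmax (stop + K) ((contains_true_iff _ _).mp hmemK) (by omega) le_rfl
            omega
          rw [if_neg (by simpa using hcK)]
          have hveq : stop + (v - stop) = v := by omega
          rw [scan_desc_some station stop (K - 1).toNat (K - 1) (v - stop) (by omega)
            (by omega) (by omega)
            (by rw [hveq]; exact (contains_true_iff _ _).mpr hvmem)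
            (fun j hj1 hj2 => by
              rw [Bool.eq_false_iff]
              intro hmemJ
              have := hvmax (stop + j) ((contains_true_iff _ _).mp hmemJ) (by omega) (by omega)
              omega)]
          show busLoop K N station f (stop + (v - stop)) (result + 1) = _
          rw [hveq]
          exact hrec
    · rw [if_neg hc]
      simp only [busLoop, if_pos hsN]
      rw [if_pos (by omega : stop + K ≥ N)]

-- ===== VERDICT (by name: the statement is the Claim_ definition above) =====
theorem bus_spec : Claim_equal_bus := by
  intro K N station _ hpre
  obtain ⟨hN, hq⟩ := hpre
  unfold Spec_bus bus bus_alt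
  have hpws : List.Pairwise (· ≤ ·) (PySem.List.sorted station (fun x => x) false) := by
    simpa using PySem.List.sorted_pairwise station (fun x => x)
  rcases lt_trichotomy K 0 with hK | hK | hK
  · -- K ≤ -1 : both sides are 0
    rw [busLoop_neg K N station (by omega) _ 0 0 hN]
    rw [busAltLoop, if_pos (by omega : (0:Int) + K < N)]
    rcases hbt : bestTake K 0 none (PySem.List.sorted station (fun x => x) false) with ⟨b, r⟩
    have hb : b = none := by
      have := bestTake_nonpos K 0 (by omega) _ hpws
      rw [hbt] at this
      exact this
    subst hb
    rfl
  · -- K = 0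
    subst hK
    by_cases hN0 : N ≤ 0
    · have hNz : N = 0 := le_antisymm hN0 hN
      subst hNz
      show busLoop 0 0 station (station.length + 1 + 1) 0 0 = _
      simp only [busLoop]
      rw [if_pos (le_refl (0:Int)), if_pos (by omega : (0:Int) + 0 ≥ 0)]
      rw [busAltLoop, if_neg (by omega : ¬ (0:Int) + 0 < 0)]
    · have h0 : (0 : Int) ∉ station := fun h => hq ⟨rfl, by omega, h⟩
      show busLoop 0 N station (station.length + 1 + 1) 0 0 = _
      simp only [busLoop]
      rw [if_pos hN, if_neg (by omega : ¬ (0:Int) + 0 ≥ N)]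
      have hc0 : station.contains (0 + 0) = false := by
        rw [Bool.eq_false_iff]
        intro hmem
        exact h0 (by simpa using (contains_true_iff _ _).mp hmem)
      rw [if_neg (by simpa using hc0)]
      rw [PySem.List.pyRange_neg_one_eq_nil (by omega : (0:Int) - 1 ≤ 0)]
      rw [busAltLoop, if_pos (by omega : (0:Int) + 0 < N)]
      rcases hbt : bestTake 0 0 none (PySem.List.sorted station (fun x => x) false) with ⟨b, r⟩
      have hb : b = none := by
        have := bestTake_nonpos 0 0 le_rfl _ hpws
        rw [hbt] at this
        exact this
      subst hb
      simp [busScan]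
  · -- K ≥ 1 : lockstep
    exact lockstep K N station (by omega) (station.length + 2) []
      (PySem.List.sorted station (fun x => x) false) 0 0 (by simp) (by simp) hN
      (by rw [PySem.List.length_sorted]; omega)
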